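-- pv_equiv track=rewrite | github.com/kcarter80/2020-advent-of-code | day-17/part-2.py | do_turn
-- ===== SOURCE A (Python) =====
-- from collections import OrderedDict
--
-- def position_value(w,z,y,x,state):
-- 	if w in state.keys():
-- 		if z in state[w].keys():
-- 			if y in state[w][z].keys():
-- 				if x in state[w][z][y].keys():
-- 					return state[w][z][y][x]
-- 	return '.'
--
-- def blank_rectangular_prism(state):
-- 	blank_rectangular_prism = OrderedDict()
-- 	for w in state.keys():
-- 		blank_rectangular_prism[w] = OrderedDict()
-- 		for z in state[w].keys():
-- 			blank_rectangular_prism[w][z] = OrderedDict()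
-- 			for y in state[w][z].keys():
-- 				blank_rectangular_prism[w][z][y] = OrderedDict()
-- 				for x in state[w][z][y].keys():
-- 					blank_rectangular_prism[w][z][y][x] = '.'
-- 	return blank_rectangular_prism
--
-- def do_turn(state):
-- 	next_state = blank_rectangular_prism(state)
-- 	for w in state.keys():
-- 		for z in state[w].keys():
-- 			for y in state[w][z].keys():
-- 				for x in state[w][z][y].keys():
-- 					# this will hit every coordinate, now need to count neighbors
-- 					active_neighbors = 0
-- 					for w_to_evaluate in range(w-1, w+2):
-- 						for z_to_evaluate in range(z-1, z+2):
-- 							for y_to_evaluate in range(y-1, y+2):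
-- 								for x_to_evaluate in range(x-1, x+2):
-- 									if w_to_evaluate != w or z_to_evaluate != z or y_to_evaluate != y or x_to_evaluate != x:
-- 										if position_value(w_to_evaluate,z_to_evaluate,y_to_evaluate,x_to_evaluate,state) == '#':
-- 											active_neighbors += 1
-- 					if state[w][z][y][x] == '#':
-- 						if active_neighbors == 2 or active_neighbors == 3:
-- 							next_state[w][z][y][x] = '#'
-- 						else:
-- 							next_state[w][z][y][x] = '.'
-- 					else:
-- 						if active_neighbors == 3:
-- 							next_state[w][z][y][x] = '#'
-- 						else:
-- 							next_state[w][z][y][x] = '.'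
-- 	return next_state
-- ===== SOURCE B (Python) =====
-- from collections import OrderedDict
--
-- # the 80 nonzero 4D neighbor offsets
-- OFFSETS = [(dw, dz, dy, dx)
--            for dw in (-1, 0, 1) for dz in (-1, 0, 1)
--            for dy in (-1, 0, 1) for dx in (-1, 0, 1)
--            if dw or dz or dy or dx]
--
-- def do_turn(state):
--     # scatter: each active cell adds 1 to the neighbor count of its 80 neighbors
--     counts = {}
--     for w, zd in state.items():
--         for z, yd in zd.items():
--             for y, xd in yd.items():
--                 for x, v in xd.items():
--                     if v == '#':
--                         for dw, dz, dy, dx in OFFSETS: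
--                             k = (w + dw, z + dz, y + dy, x + dx)
--                             counts[k] = counts.get(k, 0) + 1
--     # rebuild the prism in one pass, reading the scattered counts
--     return OrderedDict(
--         (w, OrderedDict(
--             (z, OrderedDict(
--                 (y, OrderedDict(
--                     (x, '#' if counts.get((w, z, y, x), 0) == 3
--                             or (counts.get((w, z, y, x), 0) == 2 and v == '#')
--                         else '.')
--                     for x, v in xd.items()))
--                 for y, xd in yd.items()))
--             for z, yd in zd.items()))
--         for w, zd in state.items())
-- ===== Notes on version B (the rewrite author's own statement) =====
-- stated objective: faster
-- what changed: Instead of scanning all 81 surrounding positions of every cell through nested dict probes (position_value), B makes one pass over the state scattering +1 neighbor counts from each active cell into a flat counter dict keyed by 4D coordinates, then rebuilds the prism in a single pass reading those counts.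
import Mathlib
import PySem

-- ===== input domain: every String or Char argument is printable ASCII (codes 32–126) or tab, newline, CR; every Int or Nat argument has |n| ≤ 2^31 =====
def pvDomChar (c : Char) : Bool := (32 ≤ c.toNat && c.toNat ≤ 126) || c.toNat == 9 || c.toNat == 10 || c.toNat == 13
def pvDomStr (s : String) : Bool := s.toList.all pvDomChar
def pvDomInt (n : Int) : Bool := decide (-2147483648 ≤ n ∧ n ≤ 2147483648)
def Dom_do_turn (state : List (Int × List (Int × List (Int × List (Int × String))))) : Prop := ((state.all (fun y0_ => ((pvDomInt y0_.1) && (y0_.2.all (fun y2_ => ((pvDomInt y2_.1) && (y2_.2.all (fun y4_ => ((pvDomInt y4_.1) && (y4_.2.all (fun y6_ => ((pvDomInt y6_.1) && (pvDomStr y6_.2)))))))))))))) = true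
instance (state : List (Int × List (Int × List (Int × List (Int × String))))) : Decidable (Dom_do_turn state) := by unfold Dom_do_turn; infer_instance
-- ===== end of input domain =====

-- B replaces A's 81-probe neighbour scan per cell by one scatter pass (each active cell adds
-- +1 to a counter dict at its 80 neighbour coordinates) and one rebuild pass reading the counts.

-- ===== PORT A =====
-- The Python dicts are association lists here (type convention); the dict primitives are PySem.Dict
-- applied through the PySem.Dict.mk wrapper. 'k in d.keys()' followed by 'd[k]' is ported as one
-- 'get?' match (exact: both succeed exactly when the key is present).
abbrev PvRow := List (Int × String)
abbrev PvPlane := List (Int × PvRow)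
abbrev PvCube := List (Int × PvPlane)
abbrev PvPrism := List (Int × PvCube)

def pvGet {α : Type} (l : List (Int × α)) (k : Int) : Option α := (PySem.Dict.mk l).get? k
def pvSet {α : Type} (l : List (Int × α)) (k : Int) (v : α) : List (Int × α) :=
  ((PySem.Dict.mk l).insert k v).items
-- Python's 'd[k] = f(d[k])' on a nested dict whose key k is present: PySem.Dict.modify is exact there.
def pvMod {α : Type} (l : List (Int × α)) (k : Int) (dflt : α) (f : α → α) : List (Int × α) :=
  ((PySem.Dict.mk l).modify k dflt f).items

def position_value (w z y x : Int) (state : PvPrism) : String :=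
  match pvGet state w with
  | none => "."
  | some sw =>
    match pvGet sw z with
    | none => "."
    | some sz =>
      match pvGet sz y with
      | none => "."
      | some sy =>
        match pvGet sy x with
        | none => "."
        | some v => v

def blank_rectangular_prism (state : PvPrism) : PvPrism :=
  state.foldl (fun brp pw =>
    pvSet brp pw.1 (pw.2.foldl (fun b2 pz =>
      pvSet b2 pz.1 (pz.2.foldl (fun b3 py =>
        pvSet b3 py.1 (py.2.foldl (fun b4 px => pvSet b4 px.1 ".") [])) [])) [])) []

-- the inline 'active_neighbors' quadruple range loop of A
def pvActiveNeighbors (state : PvPrism) (w z y x : Int) : Int :=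
  (PySem.List.pyRange (w-1) (w+2)).foldl (fun acc we =>
    (PySem.List.pyRange (z-1) (z+2)).foldl (fun acc ze =>
      (PySem.List.pyRange (y-1) (y+2)).foldl (fun acc ye =>
        (PySem.List.pyRange (x-1) (x+2)).foldl (fun acc xe =>
          if we ≠ w ∨ ze ≠ z ∨ ye ≠ y ∨ xe ≠ x then
            if position_value we ze ye xe state = "#" then acc + 1 else acc
          else acc) acc) acc) acc) 0

def do_turn (state : List (Int × List (Int × List (Int × List (Int × String))))) : List (Int × List (Int × List (Int × List (Int × String)))) :=
  state.foldl (fun next pw =>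
    pw.2.foldl (fun next pz =>
      pz.2.foldl (fun next py =>
        py.2.foldl (fun next px =>
          let an := pvActiveNeighbors state pw.1 pz.1 py.1 px.1
          let c : String :=
            if px.2 = "#" then (if an = 2 ∨ an = 3 then "#" else ".")
            else (if an = 3 then "#" else ".")
          pvMod next pw.1 [] (fun sw =>
            pvMod sw pz.1 [] (fun sz =>
              pvMod sz py.1 [] (fun sy =>
                pvSet sy px.1 c))))
          next)
        next)
      next)
    (blank_rectangular_prism state)

-- ===== PORT B =====
-- the comprehension over (-1,0,1)^4 skipping the all-zero tuple
def pvOffsets : List (Int × Int × Int × Int) :=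
  (([-1,0,1] : List Int).flatMap (fun dw =>
    ([-1,0,1] : List Int).flatMap (fun dz =>
      ([-1,0,1] : List Int).flatMap (fun dy =>
        ([-1,0,1] : List Int).map (fun dx => (dw, dz, dy, dx)))))).filter
    (fun d => decide (¬(d.1 = 0 ∧ d.2.1 = 0 ∧ d.2.2.1 = 0 ∧ d.2.2.2 = 0)))

-- scatter pass: counts[k] = counts.get(k, 0) + 1 for the 80 neighbours k of each active cell
def pvCounts (state : PvPrism) : PySem.Dict (Int × Int × Int × Int) Int :=
  state.foldl (fun cd pw =>
    pw.2.foldl (fun cd pz =>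
      pz.2.foldl (fun cd py =>
        py.2.foldl (fun cd px =>
          if px.2 = "#" then
            pvOffsets.foldl (fun cd d =>
              let k := (pw.1 + d.1, pz.1 + d.2.1, py.1 + d.2.2.1, px.1 + d.2.2.2)
              cd.insert k (cd.getD k 0 + 1)) cd
          else cd) cd) cd) cd) PySem.Dict.empty

-- rebuild pass: the nested dict comprehension ports to nested List.map
def do_turn_alt (state : List (Int × List (Int × List (Int × List (Int × String))))) : List (Int × List (Int × List (Int × List (Int × String)))) :=
  let counts := pvCounts state
  state.map (fun pw => (pw.1, pw.2.map (fun pz => (pz.1, pz.2.map (fun py => (py.1, py.2.map (fun px =>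
    let n := counts.getD (pw.1, pz.1, py.1, px.1) 0
    (px.1, if n = 3 ∨ (n = 2 ∧ px.2 = "#") then "#" else "."))))))))

-- ===== PRECONDITION & SPEC =====
-- Pre_ excludes association lists with duplicate keys at some nesting level: those do not represent
-- a Python dict (dict construction collapses duplicates), so assoc-list behaviour there is accidental.
def Pre_do_turn (state : List (Int × List (Int × List (Int × List (Int × String))))) : Prop :=
  (state.map Prod.fst).Nodup ∧
  ∀ pw ∈ state, (pw.2.map Prod.fst).Nodup ∧
    ∀ pz ∈ pw.2, (pz.2.map Prod.fst).Nodup ∧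
      ∀ py ∈ pz.2, (py.2.map Prod.fst).Nodup
instance (state : List (Int × List (Int × List (Int × List (Int × String))))) : Decidable (Pre_do_turn state) := by unfold Pre_do_turn; infer_instance

def pvWitness_do_turn : (List (Int × List (Int × List (Int × List (Int × String))))) :=
  [(0, [(0, [(0, [(0, "#"), (1, "#"), (2, ".")])])])]

def Spec_do_turn (state : List (Int × List (Int × List (Int × List (Int × String))))) (out : List (Int × List (Int × List (Int × List (Int × String))))) : Prop := out = do_turn_alt state
instance (state : List (Int × List (Int × List (Int × List (Int × String))))) (out : List (Int × List (Int × List (Int × List (Int × String))))) : Decidable (Spec_do_turn state out) := by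
  unfold Spec_do_turn
  letI d1 : DecidableEq (List (Int × String)) := inferInstance
  letI d2 : DecidableEq (List (Int × List (Int × String))) := inferInstance
  letI d3 : DecidableEq (List (Int × List (Int × List (Int × String)))) := inferInstance
  letI d4 : DecidableEq (List (Int × List (Int × List (Int × List (Int × String))))) := inferInstance
  infer_instance

-- ===== CLAIM (what is proved, stated in full; the proofs are below) =====
def Claim_equal_do_turn : Prop := ∀ (state : List (Int × List (Int × List (Int × List (Int × String))))), Dom_do_turn state → Pre_do_turn state → Spec_do_turn state (do_turn state)

-- ===== LEMMAS AND PROOFS =====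

-- ---------- raw association-list facts ----------
def keysOf {α : Type} (l : List (Int × α)) : List Int := l.map Prod.fst

lemma keysOf_map_pair {α β : Type} (l : List (Int × α)) (G : (Int × α) → β) :
    keysOf (l.map (fun p => (p.1, G p))) = keysOf l := by
  simp [keysOf, List.map_map]

lemma contains_iff {α : Type} (l : List (Int × α)) (k : Int) :
    (PySem.Dict.mk l).contains k = true ↔ k ∈ keysOf l := by
  simp [PySem.Dict.contains, keysOf, List.any_eq_true, List.mem_map]

lemma pvGet_cons {α : Type} (a : Int × α) (t : List (Int × α)) (k : Int) :
    pvGet (a :: t) k = if a.1 = k then some a.2 else pvGet t k := by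
  obtain ⟨ka, va⟩ := a
  show (PySem.Dict.mk ((ka, va) :: t)).get? k = _
  rw [PySem.Dict.get?_mk_cons]
  simp [pvGet]

lemma pvSet_of_not_mem {α : Type} {l : List (Int × α)} {k : Int} (v : α) (h : k ∉ keysOf l) :
    pvSet l k v = l ++ [(k, v)] := by
  have hc : ¬ (PySem.Dict.mk l).contains k = true := fun hcon => h ((contains_iff l k).mp hcon)
  simp [pvSet, PySem.Dict.insert, hc]

lemma pvSet_of_mem {α : Type} {l : List (Int × α)} {k : Int} (v : α) (h : k ∈ keysOf l) :
    pvSet l k v = l.map (fun p => if p.1 = k then (k, v) else p) := by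
  have hc : (PySem.Dict.mk l).contains k = true := (contains_iff l k).mpr h
  simp [pvSet, PySem.Dict.insert, hc]

lemma keysOf_pvSet_of_mem {α : Type} {l : List (Int × α)} {k : Int} (v : α) (h : k ∈ keysOf l) :
    keysOf (pvSet l k v) = keysOf l := by
  rw [pvSet_of_mem v h]
  simp only [keysOf, List.map_map]
  apply List.map_congr_left
  intro p _
  by_cases hp : p.1 = k <;> simp [hp]

lemma pvSet_cons_self {α : Type} {t : List (Int × α)} {k : Int} (b v : α) (h : k ∉ keysOf t) :
    pvSet ((k, b) :: t) k v = (k, v) :: t := by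
  rw [pvSet_of_mem v (by simp [keysOf])]
  simp only [List.map_cons, if_pos]
  congr 1
  have : ∀ p ∈ t, (if p.1 = k then (k, v) else p) = p := by
    intro p hp
    have : p.1 ≠ k := fun e => h (e ▸ List.mem_map_of_mem hp)
    simp [this]
  simp [List.map_congr_left this]

lemma pvSet_cons_ne {α : Type} {a : Int × α} {t : List (Int × α)} {k : Int} (v : α)
    (hne : a.1 ≠ k) (hm : k ∈ keysOf t) :
    pvSet (a :: t) k v = a :: pvSet t k v := by
  have hm' : k ∈ keysOf (a :: t) := by simp [keysOf] at hm ⊢; tauto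
  rw [pvSet_of_mem v hm', pvSet_of_mem v hm]
  simp [hne]

lemma pvMod_eq {α : Type} (l : List (Int × α)) (k : Int) (d : α) (f : α → α) :
    pvMod l k d f = pvSet l k (f ((pvGet l k).getD d)) := rfl

lemma pvMod_cons_self {α : Type} {t : List (Int × α)} {k : Int} (b : α) (d : α) (f : α → α)
    (h : k ∉ keysOf t) : pvMod ((k, b) :: t) k d f = (k, f b) :: t := by
  have hg : (if ((k, b) : Int × α).1 = k then some ((k, b) : Int × α).2 else pvGet t k) = some b := by
    simp
  rw [pvMod_eq, pvGet_cons, hg]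
  exact pvSet_cons_self _ _ h

lemma pvMod_cons_ne {α : Type} {a : Int × α} {t : List (Int × α)} {k : Int} (d : α) (f : α → α)
    (hne : a.1 ≠ k) (hm : k ∈ keysOf t) :
    pvMod (a :: t) k d f = a :: pvMod t k d f := by
  rw [pvMod_eq, pvGet_cons, if_neg hne, pvMod_eq t k d f]
  exact pvSet_cons_ne _ hne hm

lemma keysOf_pvMod_of_mem {α : Type} {l : List (Int × α)} {k : Int} (d : α) (f : α → α)
    (h : k ∈ keysOf l) : keysOf (pvMod l k d f) = keysOf l := by
  rw [pvMod_eq]; exact keysOf_pvSet_of_mem _ h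

-- ---------- generic fold shapes ----------
lemma foldl_flatMap_eq {α γ δ : Type} (l : List γ) (h : γ → List δ) (f : α → δ → α) (a : α) :
    (l.flatMap h).foldl f a = l.foldl (fun acc e => (h e).foldl f acc) a := by
  induction l generalizing a with
  | nil => rfl
  | cons e t ih => simp [List.flatMap_cons, List.foldl_append, ih]

lemma fold_mod_head {γ β : Type} (g : γ → β → β) (k : Int) (d : β) (l : List γ) :
    ∀ (b : β) (m : List (Int × β)), k ∉ keysOf m →
      l.foldl (fun acc e => pvMod acc k d (g e)) ((k, b) :: m)
        = (k, l.foldl (fun b e => g e b) b) :: m := by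
  induction l with
  | nil => intro b m _; rfl
  | cons e t ih => intro b m hm; rw [List.foldl_cons, pvMod_cons_self _ _ _ hm, ih _ _ hm]; rfl

lemma fold_mod_cons {γ β : Type} (g : γ → β → β) (k : Int) (d : β) (a : Int × β)
    (hne : k ≠ a.1) (l : List γ) :
    ∀ (m : List (Int × β)), k ∈ keysOf m →
      l.foldl (fun acc e => pvMod acc k d (g e)) (a :: m)
        = a :: l.foldl (fun acc e => pvMod acc k d (g e)) m := by
  induction l with
  | nil => intro m _; rfl
  | cons e t ih =>
    intro m hm
    rw [List.foldl_cons, pvMod_cons_ne _ _ (fun e => hne e.symm) hm, List.foldl_cons,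
      ih _ (by rw [keysOf_pvMod_of_mem _ _ hm]; exact hm)]

lemma fold_mod_keys {γ β : Type} (g : γ → β → β) (k : Int) (d : β) (l : List γ) :
    ∀ (m : List (Int × β)), k ∈ keysOf m →
      keysOf (l.foldl (fun acc e => pvMod acc k d (g e)) m) = keysOf m := by
  induction l with
  | nil => intro m _; rfl
  | cons e t ih =>
    intro m hm
    rw [List.foldl_cons, ih _ (by rw [keysOf_pvMod_of_mem _ _ hm]; exact hm),
      keysOf_pvMod_of_mem _ _ hm]

lemma fold_set_fresh {α β : Type} (H : (Int × α) → β) (l : List (Int × α)) :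
    ∀ (acc : List (Int × β)), (∀ p ∈ l, p.1 ∉ keysOf acc) → (keysOf l).Nodup →
      l.foldl (fun acc p => pvSet acc p.1 (H p)) acc
        = acc ++ l.map (fun p => (p.1, H p)) := by
  induction l with
  | nil => intro acc _ _; simp
  | cons p t ih =>
    intro acc hfresh hnd
    have hnd' := List.nodup_cons.mp hnd
    rw [List.foldl_cons, pvSet_of_not_mem _ (hfresh p (.head _)),
      ih _ (by
        intro q hq
        simp only [keysOf, List.map_append, List.map_cons, List.map_nil, List.mem_append,
          List.mem_cons]
        rintro (h1 | h2)
        · exact hfresh q (.tail _ hq) h1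
        · rcases h2 with h2 | h2
          · exact hnd'.1 (show p.1 ∈ keysOf t by rw [← h2]; exact List.mem_map_of_mem hq)
          · simp at h2) hnd'.2]
    simp

lemma fold_cons_generic {α β : Type} (φ : List (Int × β) → (Int × α) → List (Int × β))
    (hne : ∀ (a : Int × β) m (p : Int × α), p.1 ≠ a.1 → p.1 ∈ keysOf m → φ (a :: m) p = a :: φ m p)
    (hkeys : ∀ m (p : Int × α), p.1 ∈ keysOf m → keysOf (φ m p) = keysOf m)
    (t : List (Int × α)) :
    ∀ (a : Int × β) (m : List (Int × β)), (∀ p ∈ t, p.1 ≠ a.1) → (∀ p ∈ t, p.1 ∈ keysOf m) →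
      t.foldl φ (a :: m) = a :: t.foldl φ m := by
  induction t with
  | nil => intro a m _ _; rfl
  | cons p t ih =>
    intro a m h1 h2
    rw [List.foldl_cons, hne a m p (h1 p (.head _)) (h2 p (.head _)), List.foldl_cons,
      ih a (φ m p) (fun q hq => h1 q (.tail _ hq))
        (fun q hq => by rw [hkeys m p (h2 p (.head _))]; exact h2 q (.tail _ hq))]

lemma fold_map_generic {α β : Type} (φ : List (Int × β) → (Int × α) → List (Int × β))
    (ψ : (Int × α) → β → β) (G : (Int × α) → β)
    (hne : ∀ (a : Int × β) m (p : Int × α), p.1 ≠ a.1 → p.1 ∈ keysOf m → φ (a :: m) p = a :: φ m p)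
    (hkeys : ∀ m (p : Int × α), p.1 ∈ keysOf m → keysOf (φ m p) = keysOf m)
    (hself : ∀ (b : β) m (p : Int × α), p.1 ∉ keysOf m → φ ((p.1, b) :: m) p = (p.1, ψ p b) :: m)
    (l : List (Int × α)) (hnd : (keysOf l).Nodup) :
    l.foldl φ (l.map (fun p => (p.1, G p))) = l.map (fun p => (p.1, ψ p (G p))) := by
  induction l with
  | nil => rfl
  | cons p t ih =>
    have hnd' := List.nodup_cons.mp hnd
    have hkt : keysOf (t.map (fun p => (p.1, G p))) = keysOf t := keysOf_map_pair t G
    rw [List.map_cons, List.foldl_cons,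
      hself (G p) (t.map (fun p => (p.1, G p))) p (by rw [hkt]; exact hnd'.1),
      fold_cons_generic φ hne hkeys t _ _
        (fun q hq e => hnd'.1 (show p.1 ∈ keysOf t by rw [← e]; exact List.mem_map_of_mem hq))
        (fun q hq => by rw [hkt]; exact List.mem_map_of_mem hq),
      ih hnd'.2, List.map_cons]

-- ---------- the per-cell rule ----------
def ruleA (v : String) (n : Int) : String :=
  if v = "#" then (if n = 2 ∨ n = 3 then "#" else ".") else (if n = 3 then "#" else ".")
def ruleB (v : String) (n : Int) : String :=
  if n = 3 ∨ (n = 2 ∧ v = "#") then "#" else "."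

lemma rule_eq (v : String) (n : Int) : ruleA v n = ruleB v n := by
  unfold ruleA ruleB; split_ifs <;> tauto

def cellVal (state : PvPrism) (w z y x : Int) (v : String) : String :=
  ruleA v (pvActiveNeighbors state w z y x)

-- ---------- A-side structure: do_turn is a nested map of the rule ----------
lemma blank_eq (state : PvPrism) (hpre : Pre_do_turn state) :
    blank_rectangular_prism state
      = state.map (fun pw => (pw.1, pw.2.map (fun pz => (pz.1, pz.2.map (fun py =>
          (py.1, py.2.map (fun px => (px.1, ("." : String))))))))) := by
  unfold blank_rectangular_prism
  rw [fold_set_fresh _ state [] (by simp [keysOf]) hpre.1, List.nil_append]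
  apply List.map_congr_left
  intro pw hw
  obtain ⟨h2, hr2⟩ := hpre.2 pw hw
  refine Prod.ext rfl ?_
  rw [fold_set_fresh _ pw.2 [] (by simp [keysOf]) h2, List.nil_append]
  apply List.map_congr_left
  intro pz hz
  obtain ⟨h3, hr3⟩ := hr2 pz hz
  refine Prod.ext rfl ?_
  rw [fold_set_fresh _ pz.2 [] (by simp [keysOf]) h3, List.nil_append]
  apply List.map_congr_left
  intro py hy
  refine Prod.ext rfl ?_
  rw [fold_set_fresh _ py.2 [] (by simp [keysOf]) (hr3 py hy), List.nil_append]

-- flattened views of the nested loops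
def flatZ (pz : Int × PvPlane) : List ((Int × PvRow) × (Int × String)) :=
  pz.2.flatMap (fun py => py.2.map (fun px => (py, px)))
def flatW (pw : Int × PvCube) : List ((Int × PvPlane) × (Int × PvRow) × (Int × String)) :=
  pw.2.flatMap (fun pz => pz.2.flatMap (fun py => py.2.map (fun px => (pz, py, px))))

-- LEVEL 4
lemma lvl4 (state : PvPrism) (w z y : Int) (xd : PvRow) (h : (keysOf xd).Nodup) :
    xd.foldl (fun sy px => pvSet sy px.1 (cellVal state w z y px.1 px.2))
        (xd.map (fun px => (px.1, ("." : String))))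
      = xd.map (fun px => (px.1, cellVal state w z y px.1 px.2)) :=
  fold_map_generic _ (fun px _ => cellVal state w z y px.1 px.2) (fun _ => ".")
    (fun _ _ _ hne hm => pvSet_cons_ne _ (Ne.symm hne) hm)
    (fun _ _ hm => keysOf_pvSet_of_mem _ hm)
    (fun _ _ _ hnm => pvSet_cons_self _ _ hnm)
    xd h

-- LEVEL 3
lemma lvl3 (state : PvPrism) (w z : Int) (yd : PvPlane) (h : (keysOf yd).Nodup)
    (hin : ∀ py ∈ yd, (keysOf py.2).Nodup) :
    yd.foldl (fun sz py => py.2.foldl (fun sz px =>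
          pvMod sz py.1 [] (fun sy => pvSet sy px.1 (cellVal state w z py.1 px.1 px.2))) sz)
        (yd.map (fun py => (py.1, py.2.map (fun px => (px.1, ("." : String))))))
      = yd.map (fun py => (py.1, py.2.map (fun px =>
          (px.1, cellVal state w z py.1 px.1 px.2)))) := by
  rw [fold_map_generic _
      (fun py b => py.2.foldl (fun sy px => pvSet sy px.1 (cellVal state w z py.1 px.1 px.2)) b)
      (fun py => py.2.map (fun px => (px.1, ("." : String))))
      (fun a m py hne hm => fold_mod_cons _ py.1 [] a hne py.2 m hm)
      (fun m py hm => fold_mod_keys _ py.1 [] py.2 m hm)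
      (fun b m py hnm => fold_mod_head _ py.1 [] py.2 b m hnm)
      yd h]
  apply List.map_congr_left
  intro py hy
  exact Prod.ext rfl (lvl4 state w z py.1 py.2 (hin py hy))

-- LEVEL 2
lemma body2_flat (state : PvPrism) (w : Int) (sw : PvCube) (pz : Int × PvPlane) :
    pz.2.foldl (fun sw py => py.2.foldl (fun sw px =>
        pvMod sw pz.1 [] (fun sz => pvMod sz py.1 [] (fun sy =>
          pvSet sy px.1 (cellVal state w pz.1 py.1 px.1 px.2)))) sw) sw
      = (flatZ pz).foldl (fun sw t =>
          pvMod sw pz.1 [] (fun sz => pvMod sz t.1.1 [] (fun sy =>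
            pvSet sy t.2.1 (cellVal state w pz.1 t.1.1 t.2.1 t.2.2)))) sw := by
  simp only [flatZ, foldl_flatMap_eq, List.foldl_map]

lemma psi2_unflat (state : PvPrism) (w : Int) (pz : Int × PvPlane) (b : PvPlane) :
    (flatZ pz).foldl (fun sz t => pvMod sz t.1.1 [] (fun sy =>
        pvSet sy t.2.1 (cellVal state w pz.1 t.1.1 t.2.1 t.2.2))) b
      = pz.2.foldl (fun sz py => py.2.foldl (fun sz px =>
          pvMod sz py.1 [] (fun sy => pvSet sy px.1 (cellVal state w pz.1 py.1 px.1 px.2))) sz) b := by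
  simp only [flatZ, foldl_flatMap_eq, List.foldl_map]

lemma lvl2 (state : PvPrism) (w : Int) (zd : PvCube) (h : (keysOf zd).Nodup)
    (hin : ∀ pz ∈ zd, (keysOf pz.2).Nodup ∧ ∀ py ∈ pz.2, (keysOf py.2).Nodup) :
    zd.foldl (fun sw pz => pz.2.foldl (fun sw py => py.2.foldl (fun sw px =>
          pvMod sw pz.1 [] (fun sz => pvMod sz py.1 [] (fun sy =>
            pvSet sy px.1 (cellVal state w pz.1 py.1 px.1 px.2)))) sw) sw)
        (zd.map (fun pz => (pz.1, pz.2.map (fun py => (py.1, py.2.map (fun px =>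
          (px.1, ("." : String))))))))
      = zd.map (fun pz => (pz.1, pz.2.map (fun py => (py.1, py.2.map (fun px =>
          (px.1, cellVal state w pz.1 py.1 px.1 px.2)))))) := by
  have hb : ∀ (sw : PvCube) (pz : Int × PvPlane),
      pz.2.foldl (fun sw py => py.2.foldl (fun sw px =>
        pvMod sw pz.1 [] (fun sz => pvMod sz py.1 [] (fun sy =>
          pvSet sy px.1 (cellVal state w pz.1 py.1 px.1 px.2)))) sw) sw
      = (flatZ pz).foldl (fun sw t =>
          pvMod sw pz.1 [] (fun sz => pvMod sz t.1.1 [] (fun sy =>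
            pvSet sy t.2.1 (cellVal state w pz.1 t.1.1 t.2.1 t.2.2)))) sw :=
    body2_flat state w
  simp only [hb]
  rw [fold_map_generic _
      (fun pz b => (flatZ pz).foldl (fun sz t => pvMod sz t.1.1 [] (fun sy =>
        pvSet sy t.2.1 (cellVal state w pz.1 t.1.1 t.2.1 t.2.2))) b)
      (fun pz => pz.2.map (fun py => (py.1, py.2.map (fun px => (px.1, ("." : String))))))
      (fun a m pz hne hm => fold_mod_cons _ pz.1 [] a hne (flatZ pz) m hm)
      (fun m pz hm => fold_mod_keys _ pz.1 [] (flatZ pz) m hm)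
      (fun b m pz hnm => fold_mod_head _ pz.1 [] (flatZ pz) b m hnm)
      zd h]
  apply List.map_congr_left
  intro pz hz
  refine Prod.ext rfl ?_
  rw [psi2_unflat]
  exact lvl3 state w pz.1 pz.2 (hin pz hz).1 (hin pz hz).2

-- LEVEL 1
lemma body1_flat (state : PvPrism) (next : PvPrism) (pw : Int × PvCube) :
    pw.2.foldl (fun next pz => pz.2.foldl (fun next py => py.2.foldl (fun next px =>
        pvMod next pw.1 [] (fun sw => pvMod sw pz.1 [] (fun sz => pvMod sz py.1 [] (fun sy =>
          pvSet sy px.1 (cellVal state pw.1 pz.1 py.1 px.1 px.2))))) next) next) next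
      = (flatW pw).foldl (fun next t =>
          pvMod next pw.1 [] (fun sw => pvMod sw t.1.1 [] (fun sz => pvMod sz t.2.1.1 [] (fun sy =>
            pvSet sy t.2.2.1 (cellVal state pw.1 t.1.1 t.2.1.1 t.2.2.1 t.2.2.2))))) next := by
  simp only [flatW, foldl_flatMap_eq, List.foldl_map]

lemma psi1_unflat (state : PvPrism) (pw : Int × PvCube) (b : PvCube) :
    (flatW pw).foldl (fun sw t => pvMod sw t.1.1 [] (fun sz => pvMod sz t.2.1.1 [] (fun sy =>
        pvSet sy t.2.2.1 (cellVal state pw.1 t.1.1 t.2.1.1 t.2.2.1 t.2.2.2)))) b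
      = pw.2.foldl (fun sw pz => pz.2.foldl (fun sw py => py.2.foldl (fun sw px =>
          pvMod sw pz.1 [] (fun sz => pvMod sz py.1 [] (fun sy =>
            pvSet sy px.1 (cellVal state pw.1 pz.1 py.1 px.1 px.2)))) sw) sw) b := by
  simp only [flatW, foldl_flatMap_eq, List.foldl_map]

lemma A_struct (state : PvPrism) (hpre : Pre_do_turn state) :
    do_turn state
      = state.map (fun pw => (pw.1, pw.2.map (fun pz => (pz.1, pz.2.map (fun py =>
          (py.1, py.2.map (fun px => (px.1, cellVal state pw.1 pz.1 py.1 px.1 px.2)))))))) := by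
  show state.foldl (fun next pw =>
      pw.2.foldl (fun next pz => pz.2.foldl (fun next py => py.2.foldl (fun next px =>
        pvMod next pw.1 [] (fun sw => pvMod sw pz.1 [] (fun sz => pvMod sz py.1 [] (fun sy =>
          pvSet sy px.1 (cellVal state pw.1 pz.1 py.1 px.1 px.2))))) next) next) next)
    (blank_rectangular_prism state) = _
  rw [blank_eq state hpre]
  have hb : ∀ (next : PvPrism) (pw : Int × PvCube),
      pw.2.foldl (fun next pz => pz.2.foldl (fun next py => py.2.foldl (fun next px =>
        pvMod next pw.1 [] (fun sw => pvMod sw pz.1 [] (fun sz => pvMod sz py.1 [] (fun sy =>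
          pvSet sy px.1 (cellVal state pw.1 pz.1 py.1 px.1 px.2))))) next) next) next
      = (flatW pw).foldl (fun next t =>
          pvMod next pw.1 [] (fun sw => pvMod sw t.1.1 [] (fun sz => pvMod sz t.2.1.1 [] (fun sy =>
            pvSet sy t.2.2.1 (cellVal state pw.1 t.1.1 t.2.1.1 t.2.2.1 t.2.2.2))))) next :=
    body1_flat state
  simp only [hb]
  rw [fold_map_generic _
      (fun pw b => (flatW pw).foldl (fun sw t => pvMod sw t.1.1 [] (fun sz =>
        pvMod sz t.2.1.1 [] (fun sy =>
          pvSet sy t.2.2.1 (cellVal state pw.1 t.1.1 t.2.1.1 t.2.2.1 t.2.2.2)))) b)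
      (fun pw => pw.2.map (fun pz => (pz.1, pz.2.map (fun py => (py.1, py.2.map (fun px =>
        (px.1, ("." : String))))))))
      (fun a m pw hne hm => fold_mod_cons _ pw.1 [] a hne (flatW pw) m hm)
      (fun m pw hm => fold_mod_keys _ pw.1 [] (flatW pw) m hm)
      (fun b m pw hnm => fold_mod_head _ pw.1 [] (flatW pw) b m hnm)
      state hpre.1]
  apply List.map_congr_left
  intro pw hw
  refine Prod.ext rfl ?_
  rw [psi1_unflat]
  exact lvl2 state pw.1 pw.2 (hpre.2 pw hw).1
    (fun pz hz => ⟨((hpre.2 pw hw).2 pz hz).1, ((hpre.2 pw hw).2 pz hz).2⟩)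

-- ---------- coordinates, cells, active cells ----------
def padd (p d : Int × Int × Int × Int) : Int × Int × Int × Int :=
  (p.1 + d.1, p.2.1 + d.2.1, p.2.2.1 + d.2.2.1, p.2.2.2 + d.2.2.2)
def psub (p q : Int × Int × Int × Int) : Int × Int × Int × Int :=
  (p.1 - q.1, p.2.1 - q.2.1, p.2.2.1 - q.2.2.1, p.2.2.2 - q.2.2.2)

def pvCells (state : PvPrism) : List ((Int × Int × Int × Int) × String) :=
  state.flatMap (fun pw => pw.2.flatMap (fun pz => pz.2.flatMap (fun py =>
    py.2.map (fun px => ((pw.1, pz.1, py.1, px.1), px.2)))))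

def pvActive (state : PvPrism) : List (Int × Int × Int × Int) :=
  (pvCells state).flatMap (fun c => if c.2 = "#" then [c.1] else [])

lemma pvGet_some_iff {α : Type} {l : List (Int × α)} (hnd : (keysOf l).Nodup) (k : Int) (v : α) :
    pvGet l k = some v ↔ (k, v) ∈ l :=
  PySem.Dict.get?_eq_some_iff_mem_items (PySem.Dict.mk l) k v hnd

lemma nodup_flatMap_of_key {α β γ : Type} (l : List (α × β)) (g : (α × β) → List γ) (key : γ → α)
    (hnd : (l.map Prod.fst).Nodup) (hin : ∀ p ∈ l, (g p).Nodup)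
    (hkey : ∀ p ∈ l, ∀ c ∈ g p, key c = p.1) :
    (l.flatMap g).Nodup := by
  rw [List.nodup_flatMap]
  refine ⟨hin, ?_⟩
  have hp : l.Pairwise (fun a b => a.1 ≠ b.1) := by
    have := hnd
    rw [List.Nodup, List.pairwise_map] at this
    exact this
  exact hp.imp_of_mem (fun {a b} ha hb hne c hc1 hc2 =>
    hne (by rw [← hkey _ ha c hc1, ← hkey _ hb c hc2]))

lemma cells_coords_nodup (state : PvPrism) (hpre : Pre_do_turn state) :
    ((pvCells state).map Prod.fst).Nodup := by
  unfold pvCells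
  rw [List.map_flatMap]
  apply nodup_flatMap_of_key _ _ (fun c => c.1) hpre.1
  · intro pw hw
    rw [List.map_flatMap]
    apply nodup_flatMap_of_key _ _ (fun c => c.2.1) (hpre.2 pw hw).1
    · intro pz hz
      rw [List.map_flatMap]
      apply nodup_flatMap_of_key _ _ (fun c => c.2.2.1) ((hpre.2 pw hw).2 pz hz).1
      · intro py hy
        rw [List.map_map]
        have : ((fun x => x.1) ∘ (fun px : Int × String => ((pw.1, pz.1, py.1, px.1), px.2)))
            = (fun k => (pw.1, pz.1, py.1, k)) ∘ Prod.fst := rfl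
        rw [this, ← List.map_map]
        exact List.Nodup.map (fun a b h => by simpa using h)
          (((hpre.2 pw hw).2 pz hz).2 py hy)
      · intro py _ c hc
        simp only [List.map_map, List.mem_map] at hc
        obtain ⟨px, _, rfl⟩ := hc
        rfl
    · intro pz _ c hc
      simp only [List.map_flatMap, List.mem_flatMap, List.map_map, List.mem_map] at hc
      obtain ⟨py, _, px, _, rfl⟩ := hc
      rfl
  · intro pw _ c hc
    simp only [List.map_flatMap, List.mem_flatMap, List.map_map, List.mem_map] at hc
    obtain ⟨pz, _, py, _, px, _, rfl⟩ := hc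
    rfl

lemma active_eq_filter (state : PvPrism) :
    pvActive state = ((pvCells state).filter (fun c => decide (c.2 = "#"))).map Prod.fst := by
  unfold pvActive
  generalize pvCells state = l
  induction l with
  | nil => rfl
  | cons c t ih => by_cases h : c.2 = "#" <;> simp [h, ih]

lemma active_nodup (state : PvPrism) (hpre : Pre_do_turn state) :
    (pvActive state).Nodup := by
  rw [active_eq_filter]
  exact List.Nodup.sublist (List.Sublist.map _ List.filter_sublist) (cells_coords_nodup state hpre)

lemma mem_active_iff (state : PvPrism) (r : Int × Int × Int × Int) :
    r ∈ pvActive state ↔ (r, "#") ∈ pvCells state := by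
  unfold pvActive
  rw [List.mem_flatMap]
  constructor
  · rintro ⟨c, hc, hr⟩
    by_cases h : c.2 = "#"
    · simp only [h, if_pos, List.mem_singleton] at hr
      have : c = (r, "#") := by
        obtain ⟨c1, c2⟩ := c
        simp_all
      exact this ▸ hc
    · simp [h] at hr
  · intro hc
    exact ⟨(r, "#"), hc, by simp⟩

lemma mem_cells_iff (state : PvPrism) (c : (Int × Int × Int × Int) × String) :
    c ∈ pvCells state ↔ ∃ pw ∈ state, ∃ pz ∈ pw.2, ∃ py ∈ pz.2, ∃ px ∈ py.2,
      ((pw.1, pz.1, py.1, px.1), px.2) = c := by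
  simp [pvCells, List.mem_flatMap, List.mem_map]

lemma posval_iff (state : PvPrism) (hpre : Pre_do_turn state) (w z y x : Int) :
    position_value w z y x state = "#" ↔ ((w, z, y, x), "#") ∈ pvCells state := by
  constructor
  · intro h
    unfold position_value at h
    rcases h1 : pvGet state w with _ | sw
    · simp only [h1] at h; exact absurd h (by decide)
    simp only [h1] at h
    rcases h2 : pvGet sw z with _ | sz
    · simp only [h2] at h; exact absurd h (by decide)
    simp only [h2] at h
    rcases h3 : pvGet sz y with _ | sy
    · simp only [h3] at h; exact absurd h (by decide)
    simp only [h3] at h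
    rcases h4 : pvGet sy x with _ | v
    · simp only [h4] at h; exact absurd h (by decide)
    simp only [h4] at h
    have hw : (w, sw) ∈ state := (pvGet_some_iff hpre.1 w sw).mp h1
    have hpre2 := hpre.2 (w, sw) hw
    have hz : (z, sz) ∈ sw := (pvGet_some_iff hpre2.1 z sz).mp h2
    have hpre3 := hpre2.2 (z, sz) hz
    have hy : (y, sy) ∈ sz := (pvGet_some_iff hpre3.1 y sy).mp h3
    have hx : (x, v) ∈ sy := (pvGet_some_iff (hpre3.2 (y, sy) hy) x v).mp h4
    rw [mem_cells_iff]
    exact ⟨(w, sw), hw, (z, sz), hz, (y, sy), hy, (x, v), hx, by rw [h]⟩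
  · intro hc
    rw [mem_cells_iff] at hc
    obtain ⟨pw, hw, pz, hz, py, hy, px, hx, heq⟩ := hc
    simp only [Prod.mk.injEq] at heq
    obtain ⟨⟨e1, e2, e3, e4⟩, e5⟩ := heq
    have hw' : (w, pw.2) ∈ state := by rw [← e1]; exact hw
    have h1 : pvGet state w = some pw.2 := (pvGet_some_iff hpre.1 w pw.2).mpr hw'
    have hpre2 := hpre.2 (w, pw.2) hw'
    have hz' : (z, pz.2) ∈ pw.2 := by rw [← e2]; exact hz
    have h2 : pvGet pw.2 z = some pz.2 := (pvGet_some_iff hpre2.1 z pz.2).mpr hz'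
    have hpre3 := hpre2.2 (z, pz.2) hz'
    have hy' : (y, py.2) ∈ pz.2 := by rw [← e3]; exact hy
    have h3 : pvGet pz.2 y = some py.2 := (pvGet_some_iff hpre3.1 y py.2).mpr hy'
    have hx' : (x, px.2) ∈ py.2 := by rw [← e4]; exact hx
    have h4 : pvGet py.2 x = some px.2 := (pvGet_some_iff (hpre3.2 (y, py.2) hy') x px.2).mpr hx'
    unfold position_value
    simp only [h1, h2, h3, h4]
    exact e5

-- ---------- counting lemmas (moved below) ----------
-- ---------- the two counts agree ----------
lemma pyRange3 (a : Int) : PySem.List.pyRange (a-1) (a+2) = ([-1,0,1] : List Int).map (fun t => a + t) := by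
  rw [PySem.List.pyRange_one_cons (by omega), PySem.List.pyRange_one_cons (by omega),
    PySem.List.pyRange_one_cons (by omega), PySem.List.pyRange_one_eq_nil (by omega)]
  simp only [List.map_cons, List.map_nil, List.cons.injEq, and_true]
  omega


-- ---------- offsets facts ----------
def prodOff : List (Int × Int × Int × Int) :=
  ([-1,0,1] : List Int).flatMap (fun dw =>
    ([-1,0,1] : List Int).flatMap (fun dz =>
      ([-1,0,1] : List Int).flatMap (fun dy =>
        ([-1,0,1] : List Int).map (fun dx => (dw, dz, dy, dx)))))

lemma pvOffsets_eq : pvOffsets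
    = prodOff.filter (fun d => decide (¬(d.1 = 0 ∧ d.2.1 = 0 ∧ d.2.2.1 = 0 ∧ d.2.2.2 = 0))) := rfl

lemma off_nodup : pvOffsets.Nodup := by decide

lemma mem_off_iff (d : Int × Int × Int × Int) :
    d ∈ pvOffsets ↔ (-1 ≤ d.1 ∧ d.1 ≤ 1 ∧ -1 ≤ d.2.1 ∧ d.2.1 ≤ 1 ∧ -1 ≤ d.2.2.1 ∧ d.2.2.1 ≤ 1
      ∧ -1 ≤ d.2.2.2 ∧ d.2.2.2 ≤ 1 ∧ ¬(d.1 = 0 ∧ d.2.1 = 0 ∧ d.2.2.1 = 0 ∧ d.2.2.2 = 0)) := by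
  obtain ⟨a, b, c, e⟩ := d
  rw [pvOffsets_eq, List.mem_filter]
  simp only [prodOff, List.mem_flatMap, List.mem_map, List.mem_cons, List.not_mem_nil,
    or_false, Prod.mk.injEq, decide_eq_true_eq]
  constructor
  · rintro ⟨⟨dw, hdw, dz, hdz, dy, hdy, dx, hdx, h1, h2, h3, h4⟩, hnz⟩
    subst h1; subst h2; subst h3; subst h4
    omega
  · rintro h
    exact ⟨⟨a, by omega, b, by omega, c, by omega, e, by omega, rfl, rfl, rfl, rfl⟩, by omega⟩

-- ---------- generic counting lemmas ----------
lemma countP_eq_sum_map {α : Type} (p : α → Bool) (l : List α) :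
    l.countP p = (l.map (fun a => if p a then 1 else 0)).sum := by
  induction l with
  | nil => rfl
  | cons a t ih => by_cases h : p a <;> simp [h, ih, Nat.add_comm]

lemma countP_or_disjoint {α : Type} (p q : α → Bool) (l : List α)
    (h : ∀ a ∈ l, ¬(p a = true ∧ q a = true)) :
    l.countP (fun a => p a || q a) = l.countP p + l.countP q := by
  induction l with
  | nil => rfl
  | cons a t ih =>
    have ht := ih (fun b hb => h b (.tail _ hb))
    have ha := h a (.head _)
    by_cases pa : p a = true
    · by_cases qa : q a = true
      · exact absurd ⟨pa, qa⟩ ha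
      · simp [pa, qa, ht]; omega
    · by_cases qa : q a = true
      · simp [pa, qa, ht]; omega
      · simp [pa, qa, ht]

lemma countP_eq_ite_mem {α : Type} [BEq α] [LawfulBEq α] (Y : List α) (x : α) (hY : Y.Nodup) :
    Y.countP (fun a => a == x) = if x ∈ Y then 1 else 0 := by
  rw [← List.count_eq_countP]
  by_cases h : x ∈ Y
  · rw [if_pos h]; exact List.count_eq_one_of_mem hY h
  · rw [if_neg h]; exact List.count_eq_zero_of_not_mem h

lemma countP_mem_comm {α : Type} [DecidableEq α] [BEq α] [LawfulBEq α]
    (X Y : List α) (hX : X.Nodup) (hY : Y.Nodup) :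
    X.countP (fun a => decide (a ∈ Y)) = Y.countP (fun a => decide (a ∈ X)) := by
  induction X with
  | nil => simp
  | cons x X ih =>
    have hX' := List.nodup_cons.mp hX
    have hsplit : Y.countP (fun a => decide (a ∈ x :: X))
        = Y.countP (fun a => a == x) + Y.countP (fun a => decide (a ∈ X)) := by
      have hp : ∀ a, (decide (a ∈ x :: X)) = ((a == x) || (decide (a ∈ X))) := by
        intro a
        rw [Bool.eq_iff_iff]
        simp [List.mem_cons]
      simp only [hp]
      exact countP_or_disjoint _ _ Y (fun a _ hand => by
        have h1 : a = x := eq_of_beq hand.1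
        have h2 : a ∈ X := of_decide_eq_true hand.2
        exact hX'.1 (h1 ▸ h2))
    rw [hsplit, countP_eq_ite_mem Y x hY, List.countP_cons, ← ih hX'.2]
    simp [Nat.add_comm]

-- ---------- flattening pvCounts ----------
def counterStep (cd : PySem.Dict (Int × Int × Int × Int) Int) (k : Int × Int × Int × Int) :
    PySem.Dict (Int × Int × Int × Int) Int := cd.insert k (cd.getD k 0 + 1)

def sKeys (state : PvPrism) : List (Int × Int × Int × Int) :=
  (pvCells state).flatMap (fun c =>
    if c.2 = "#" then pvOffsets.map (fun d => padd c.1 d) else [])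

lemma foldl_ite_nil {α β : Type} (c : Prop) [Decidable c] (l : List β) (f : α → β → α) (a : α) :
    (if c then l else []).foldl f a = if c then l.foldl f a else a := by
  split <;> rfl

lemma pvCounts_eq (state : PvPrism) :
    pvCounts state = (sKeys state).foldl counterStep PySem.Dict.empty := by
  unfold pvCounts sKeys pvCells counterStep padd
  simp only [foldl_flatMap_eq, List.foldl_map, foldl_ite_nil]

lemma getD_counts (state : PvPrism) (p : Int × Int × Int × Int) :
    (pvCounts state).getD p 0 = ((sKeys state).count p : Int) := by
  rw [pvCounts_eq]
  have h := PySem.Dict.getD_foldl_insert_add_one (sKeys state)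
      (PySem.Dict.empty : PySem.Dict (Int × Int × Int × Int) Int) p
  unfold counterStep
  rw [h, PySem.Dict.getD_empty]
  ring

lemma sum_map_flatMap_if_singleton {γ δ : Type} (l : List γ) (P : γ → Prop) [DecidablePred P]
    (f : γ → δ) (g : δ → Nat) :
    ((l.flatMap (fun c => if P c then [f c] else [])).map g).sum
      = (l.map (fun c => if P c then g (f c) else 0)).sum := by
  induction l with
  | nil => rfl
  | cons c t ih => by_cases h : P c <;> simp [h, ih]

lemma count_sKeys (state : PvPrism) (p : Int × Int × Int × Int) :
    (sKeys state).count p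
      = ((pvActive state).map (fun q => pvOffsets.countP (fun d => padd q d == p))).sum := by
  unfold sKeys
  rw [List.count_flatMap]
  have hcell : ∀ c : (Int × Int × Int × Int) × String,
      List.count p (if c.2 = "#" then pvOffsets.map (fun d => padd c.1 d) else [])
        = if c.2 = "#" then pvOffsets.countP (fun d => padd c.1 d == p) else 0 := by
    intro c
    split
    · rw [List.count_eq_countP, List.countP_map]; rfl
    · rfl
  simp only [Function.comp_def, hcell]
  unfold pvActive
  rw [sum_map_flatMap_if_singleton]

-- ---------- A's count as a countP over the offsets ----------
lemma ite_collapse (c d : Prop) [Decidable c] [Decidable d] (acc : Int) :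
    (if c then (if d then acc + 1 else acc) else acc)
      = if (decide c && decide d) = true then acc + 1 else acc := by
  by_cases hc : c <;> by_cases hd : d <;> simp [hc, hd]

lemma sum_map_cast {γ : Type} (l : List γ) (g : γ → Nat) :
    (l.map (fun e => ((g e : Nat) : Int))).sum = ((l.map g).sum : Int) := by
  induction l with
  | nil => rfl
  | cons c t ih => simp only [List.map_cons, List.sum_cons, ih, Nat.cast_add]

lemma pvAN_eq (state : PvPrism) (w z y x : Int) :
    pvActiveNeighbors state w z y x
      = (prodOff.countP (fun d =>
          decide (¬(d.1 = 0 ∧ d.2.1 = 0 ∧ d.2.2.1 = 0 ∧ d.2.2.2 = 0))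
          && decide (position_value (w + d.1) (z + d.2.1) (y + d.2.2.1) (x + d.2.2.2) state = "#")) : Int) := by
  unfold pvActiveNeighbors prodOff
  simp only [pyRange3, List.foldl_map]
  have hcond : ∀ dw dz dy dx : Int,
      (decide (w + dw ≠ w ∨ z + dz ≠ z ∨ y + dy ≠ y ∨ x + dx ≠ x))
        = decide (¬(dw = 0 ∧ dz = 0 ∧ dy = 0 ∧ dx = 0)) := by
    intro dw dz dy dx
    rw [decide_eq_decide]
    omega
  simp only [ite_collapse, hcond, PySem.List.foldl_count_if, PySem.List.foldl_add]
  simp only [List.countP_flatMap, List.countP_map, Function.comp_def]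
  simp only [sum_map_cast]
  rw [zero_add]

lemma pvAN_eq_off (state : PvPrism) (w z y x : Int) :
    pvActiveNeighbors state w z y x
      = (pvOffsets.countP (fun d =>
          decide (position_value (w + d.1) (z + d.2.1) (y + d.2.2.1) (x + d.2.2.2) state = "#")) : Int) := by
  rw [pvAN_eq, pvOffsets_eq, List.countP_filter]
  exact congrArg Nat.cast
    (congrArg (fun p => List.countP p prodOff) (funext fun d => Bool.and_comm _ _))

-- ---------- the bijection between the two counts ----------
lemma padd_eq_iff (q d p : Int × Int × Int × Int) : (padd q d == p) = (d == psub p q) := by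
  obtain ⟨q1, q2, q3, q4⟩ := q
  obtain ⟨d1, d2, d3, d4⟩ := d
  obtain ⟨p1, p2, p3, p4⟩ := p
  rw [Bool.eq_iff_iff]
  simp only [beq_iff_eq, padd, psub, Prod.mk.injEq]
  omega

lemma countP_padd_eq (q p : Int × Int × Int × Int) :
    pvOffsets.countP (fun d => padd q d == p) = if psub p q ∈ pvOffsets then 1 else 0 := by
  simp only [padd_eq_iff]
  rw [countP_eq_ite_mem _ _ off_nodup]

lemma mem_shifted_iff (p q : Int × Int × Int × Int) :
    q ∈ pvOffsets.map (fun d => padd p d) ↔ psub p q ∈ pvOffsets := by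
  rw [List.mem_map]
  constructor
  · rintro ⟨d, hd, rfl⟩
    rw [mem_off_iff] at hd ⊢
    obtain ⟨p1, p2, p3, p4⟩ := p
    obtain ⟨d1, d2, d3, d4⟩ := d
    simp only [padd, psub] at *
    omega
  · intro h
    refine ⟨psub q p, ?_, ?_⟩
    · rw [mem_off_iff] at h ⊢
      obtain ⟨p1, p2, p3, p4⟩ := p
      obtain ⟨q1, q2, q3, q4⟩ := q
      simp only [psub] at *
      omega
    · obtain ⟨p1, p2, p3, p4⟩ := p
      obtain ⟨q1, q2, q3, q4⟩ := q
      simp only [padd, psub, Prod.mk.injEq]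
      omega

lemma padd_injective (p : Int × Int × Int × Int) : Function.Injective (fun d => padd p d) := by
  intro a b h
  obtain ⟨p1, p2, p3, p4⟩ := p
  obtain ⟨a1, a2, a3, a4⟩ := a
  obtain ⟨b1, b2, b3, b4⟩ := b
  simp only [padd, Prod.mk.injEq] at h ⊢
  omega

lemma count_final (state : PvPrism) (hpre : Pre_do_turn state) (w z y x : Int) :
    pvOffsets.countP (fun d =>
        decide (position_value (w + d.1) (z + d.2.1) (y + d.2.2.1) (x + d.2.2.2) state = "#"))
      = ((pvActive state).map (fun q =>
          pvOffsets.countP (fun d => padd q d == (w, z, y, x)))).sum := by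
  have hpred : ∀ d : Int × Int × Int × Int,
      (decide (position_value (w + d.1) (z + d.2.1) (y + d.2.2.1) (x + d.2.2.2) state = "#"))
        = decide (padd (w, z, y, x) d ∈ pvActive state) := by
    intro d
    rw [decide_eq_decide, posval_iff state hpre, ← mem_active_iff]
    rfl
  simp only [hpred]
  have hmap : pvOffsets.countP (fun d => decide (padd (w, z, y, x) d ∈ pvActive state))
      = (pvOffsets.map (fun d => padd (w, z, y, x) d)).countP
          (fun q => decide (q ∈ pvActive state)) := by
    rw [List.countP_map]; rfl
  rw [hmap, countP_mem_comm (pvOffsets.map (fun d => padd (w, z, y, x) d)) (pvActive state)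
    (List.Nodup.map (padd_injective (w, z, y, x)) off_nodup) (active_nodup state hpre),
    countP_eq_sum_map]
  apply congrArg
  apply List.map_congr_left
  intro q _
  rw [countP_padd_eq]
  simp only [decide_eq_true_eq, mem_shifted_iff]

lemma counts_eq (state : PvPrism) (hpre : Pre_do_turn state) (w z y x : Int) :
    pvActiveNeighbors state w z y x = (pvCounts state).getD (w, z, y, x) 0 := by
  rw [pvAN_eq_off state w z y x, getD_counts, count_sKeys, count_final state hpre w z y x]

-- ---------- assembly ----------
lemma do_turn_alt_eq (state : PvPrism) :
    do_turn_alt state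
      = state.map (fun pw => (pw.1, pw.2.map (fun pz => (pz.1, pz.2.map (fun py =>
          (py.1, py.2.map (fun px => (px.1, ruleB px.2 ((pvCounts state).getD (pw.1, pz.1, py.1, px.1) 0))))))))) := rfl


-- ===== VERDICT (by name: the statement is the Claim_ definition above) =====
theorem do_turn_spec : Claim_equal_do_turn := by
  intro state _ hpre
  unfold Spec_do_turn
  rw [A_struct state hpre, do_turn_alt_eq]
  simp only [cellVal, rule_eq, counts_eq state hpre]
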